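-- pv_equiv track=rewrite | github.com/Natalia537/abc-super-xyz | app.py | detect_month_cols
-- ===== SOURCE A (Python) =====
-- _MONTH_MAP = {
--     "ENE":1,"ENERO":1,"JAN":1,"JANUARY":1,
--     "FEB":2,"FEBRERO":2,"FEBRUARY":2,
--     "MAR":3,"MARZO":3,"MARCH":3,
--     "ABR":4,"ABRIL":4,"APR":4,"APRIL":4,
--     "MAY":5,"MAYO":5,"MAY":5,
--     "JUN":6,"JUNIO":6,"JUNE":6,
--     "JUL":7,"JULIO":7,"JULY":7,
--     "AGO":8,"AGOSTO":8,"AUG":8,"AUGUST":8,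
--     "SEP":9,"SEPT":9,"SET":9,"SEPTIEMBRE":9,"SEPTEMBER":9,
--     "OCT":10,"OCTUBRE":10,"OCTOBER":10,
--     "NOV":11,"NOVIEMBRE":11,"NOVEMBER":11,
--     "DIC":12,"DICIEMBRE":12,"DEC":12,"DECEMBER":12,
-- }
--
-- def detect_month_cols(df_cols):
--     found=[]
--     for c in df_cols:
--         up = str(c).strip().upper()
--         for key, m in _MONTH_MAP.items():
--             if key in up: found.append((c,m)); break
--     found = sorted(found, key=lambda x: (x[1], list(df_cols).index(x[0])))
--     return [c for c,_ in found]
-- ===== SOURCE B (Python) =====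
-- _MONTH_TOKENS = [
--     ["ENE","ENERO","JAN","JANUARY"],
--     ["FEB","FEBRERO","FEBRUARY"],
--     ["MAR","MARZO","MARCH"],
--     ["ABR","ABRIL","APR","APRIL"],
--     ["MAY","MAYO"],
--     ["JUN","JUNIO","JUNE"],
--     ["JUL","JULIO","JULY"],
--     ["AGO","AGOSTO","AUG","AUGUST"],
--     ["SEP","SEPT","SET","SEPTIEMBRE","SEPTEMBER"],
--     ["OCT","OCTUBRE","OCTOBER"],
--     ["NOV","NOVIEMBRE","NOVEMBER"],
--     ["DIC","DICIEMBRE","DEC","DECEMBER"],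
-- ]
--
-- def detect_month_cols(df_cols):
--     # Month-major sweep: the original dict lists its keys grouped by month in
--     # ascending order, so its first-match break selects the SMALLEST matching
--     # month.  Hence: normalise every name once, then for each month 1..12 emit
--     # (in original order) the columns that contain one of that month's tokens
--     # and none of an earlier month's.  No sort, no .index.
--     ups = [(c, str(c).strip().upper()) for c in df_cols]
--     out = []
--     for m in range(12):
--         toks = _MONTH_TOKENS[m]
--         earlier = [t for g in _MONTH_TOKENS[:m] for t in g]
--         out += [c for c, up in ups
--                 if any(t in up for t in toks)
--                 and not any(t in up for t in earlier)]
--     return out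
-- ===== Notes on version B (the rewrite author's own statement) =====
-- stated objective: alternative
-- what changed: B replaces A's per-column dict scan plus comparison sort with an .index tie-break by a month-major sweep: names are normalised once, then for each month 1..12 (the dict's ascending grouping makes A's first match the smallest matching month) it emits in original order the columns containing one of that month's tokens and none of an earlier month's -- no sort, no .index.
import Mathlib
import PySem

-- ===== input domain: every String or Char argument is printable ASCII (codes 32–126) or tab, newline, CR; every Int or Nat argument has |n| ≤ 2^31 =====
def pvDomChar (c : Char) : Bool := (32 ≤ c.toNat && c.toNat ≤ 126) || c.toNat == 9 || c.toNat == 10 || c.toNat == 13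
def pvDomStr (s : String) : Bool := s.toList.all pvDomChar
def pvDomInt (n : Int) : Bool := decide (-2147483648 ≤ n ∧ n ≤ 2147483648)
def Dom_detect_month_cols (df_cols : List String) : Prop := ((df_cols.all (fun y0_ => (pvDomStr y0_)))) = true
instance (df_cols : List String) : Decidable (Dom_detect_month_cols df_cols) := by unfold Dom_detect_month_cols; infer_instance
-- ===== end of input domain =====

-- B replaces A's per-column dict scan followed by a comparison sort with an `.index`
-- tie-break by a month-major sweep: for each month 1..12 in ascending order it emits,
-- in original order, the columns containing a token of that month and none of an
-- earlier month (the dict lists months ascending, so A's first match is the minimal month).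

-- ===== PORT A =====
-- _MONTH_MAP.items(): insertion order, the duplicate "MAY" key collapsed onto its first position.
def pvMonthItems : List (String × Int) :=
  [("ENE",1),("ENERO",1),("JAN",1),("JANUARY",1),
   ("FEB",2),("FEBRERO",2),("FEBRUARY",2),
   ("MAR",3),("MARZO",3),("MARCH",3),
   ("ABR",4),("ABRIL",4),("APR",4),("APRIL",4),
   ("MAY",5),("MAYO",5),
   ("JUN",6),("JUNIO",6),("JUNE",6),
   ("JUL",7),("JULIO",7),("JULY",7),
   ("AGO",8),("AGOSTO",8),("AUG",8),("AUGUST",8),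
   ("SEP",9),("SEPT",9),("SET",9),("SEPTIEMBRE",9),("SEPTEMBER",9),
   ("OCT",10),("OCTUBRE",10),("OCTOBER",10),
   ("NOV",11),("NOVIEMBRE",11),("NOVEMBER",11),
   ("DIC",12),("DICIEMBRE",12),("DEC",12),("DECEMBER",12)]

-- A's inner loop: first key of _MONTH_MAP contained in str(c).strip().upper()
def pvMonth (c : String) : Option Int :=
  let up := PySem.Str.upper (PySem.Str.strip c)
  (List.find? (fun km => PySem.Str.isIn km.1 up) pvMonthItems).map (fun km => km.2)

def detect_month_cols (df_cols : List String) : List String :=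
  let found : List (String × Int) :=
    df_cols.foldl (fun acc c =>
      match pvMonth c with
      | some m => acc ++ [(c, m)]
      | none => acc) []
  -- sorted(found, key=lambda x: (x[1], list(df_cols).index(x[0]))); x[0] is always a member
  -- of df_cols, so Python's .index never raises; its value is index? … |>.getD 0.
  (PySem.List.sorted2 found (fun x => x.2)
      (fun x => (((PySem.List.index? df_cols x.1).getD 0 : Nat) : Int))).map (fun x => x.1)

-- ===== PORT B =====
-- _MONTH_TOKENS of Source B: the twelve token groups in month order
def pvMonthTokens : List (List String) :=
  [["ENE","ENERO","JAN","JANUARY"],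
   ["FEB","FEBRERO","FEBRUARY"],
   ["MAR","MARZO","MARCH"],
   ["ABR","ABRIL","APR","APRIL"],
   ["MAY","MAYO"],
   ["JUN","JUNIO","JUNE"],
   ["JUL","JULIO","JULY"],
   ["AGO","AGOSTO","AUG","AUGUST"],
   ["SEP","SEPT","SET","SEPTIEMBRE","SEPTEMBER"],
   ["OCT","OCTUBRE","OCTOBER"],
   ["NOV","NOVIEMBRE","NOVEMBER"],
   ["DIC","DICIEMBRE","DEC","DECEMBER"]]

-- any(t in up for t in toks)
def pvHasTok (toks : List String) (up : String) : Bool :=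
  toks.any (fun t => PySem.Str.isIn t up)

def detect_month_cols_alt (df_cols : List String) : List String :=
  let ups := df_cols.map (fun c => (c, PySem.Str.upper (PySem.Str.strip c)))
  (PySem.List.pyRange 0 12 1).foldl (fun out m =>
    let toks := PySem.List.pyGetD pvMonthTokens m []
    let earlier := (PySem.List.slice pvMonthTokens none (some m)).flatten
    out ++ (ups.filter (fun cu =>
        pvHasTok toks cu.2 && !pvHasTok earlier cu.2)).map (fun cu => cu.1)) []

-- ===== PRECONDITION & SPEC =====
-- Pre_ excludes inputs where a duplicated month-bearing column name reappears interleaved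
-- with a different column of the same month: there A's `.index`-based tie-break regroups the
-- duplicates at their first occurrence, an accidental order, while B keeps occurrence order.
def Pre_detect_month_cols (df_cols : List String) : Prop :=
  ∀ m ∈ PySem.List.pyRange 1 13 1,
    (df_cols.filter (fun c => pvMonth c == some m)).Pairwise
      (fun a b => (PySem.List.index? df_cols a).getD 0 ≤ (PySem.List.index? df_cols b).getD 0)
instance (df_cols : List String) : Decidable (Pre_detect_month_cols df_cols) := by
  unfold Pre_detect_month_cols; infer_instance

def pvWitness_detect_month_cols : List String := ["Enero", "  feb ", "total", "sept-21"]

def Spec_detect_month_cols (df_cols : List String) (out : List String) : Prop := out = detect_month_cols_alt df_cols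
instance (df_cols : List String) (out : List String) : Decidable (Spec_detect_month_cols df_cols out) := by unfold Spec_detect_month_cols; infer_instance

-- ===== CLAIM (what is proved, stated in full; the proofs are below) =====
def Claim_equal_detect_month_cols : Prop := ∀ (df_cols : List String), Dom_detect_month_cols df_cols → Pre_detect_month_cols df_cols → Spec_detect_month_cols df_cols (detect_month_cols df_cols)

-- ===== LEMMAS AND PROOFS =====

-- (month, name) pairs of the matching columns, in column order
def pvMPairs (df : List String) : List (Int × String) :=
  df.filterMap (fun c => (pvMonth c).map (fun m => (m, c)))

-- A's sort key, as one lexicographic key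
def pvKey (df : List String) (x : String × Int) : Lex (Int × Int) :=
  toLex (x.2, (((PySem.List.index? df x.1).getD 0 : Nat) : Int))

-- proof-side recursions: month-of via token groups, and the grouped items list
def pvMog (gs : List (List String)) (m : Int) (up : String) : Option Int :=
  match gs with
  | [] => none
  | g :: gs => if pvHasTok g up then some m else pvMog gs (m + 1) up

def pvG2I (gs : List (List String)) (m : Int) : List (String × Int) :=
  match gs with
  | [] => []
  | g :: gs => g.map (fun t => (t, m)) ++ pvG2I gs (m + 1)

lemma pvItems_eq : pvMonthItems = pvG2I pvMonthTokens 1 := by decide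

lemma find_g2i (gs : List (List String)) (m : Int) (up : String) :
    (List.find? (fun km => PySem.Str.isIn km.1 up) (pvG2I gs m)).map (fun km => km.2)
      = pvMog gs m up := by
  induction gs generalizing m with
  | nil => rfl
  | cons g gs ih =>
    simp only [pvG2I, pvMog, List.find?_append]
    cases h : List.find? (fun t => PySem.Str.isIn t up) g with
    | some t =>
      have hmem := List.mem_of_find?_eq_some h
      have hp := List.find?_some h
      have hany : pvHasTok g up = true := List.any_eq_true.mpr ⟨t, hmem, hp⟩
      have hfm : List.find? (fun km => PySem.Str.isIn km.1 up) (g.map (fun t => (t, m))) = some (t, m) := by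
        rw [List.find?_map]
        simp only [Function.comp_def]
        rw [h]; rfl
      rw [hfm, hany]
      simp
    | none =>
      have hany : pvHasTok g up = false := by
        unfold pvHasTok
        rw [List.any_eq_false]
        intro t ht
        have := List.find?_eq_none.mp h t ht
        simpa using this
      have hfm : List.find? (fun km => PySem.Str.isIn km.1 up) (g.map (fun t => (t, m))) = none := by
        rw [List.find?_map]
        simp only [Function.comp_def, h, Option.map_none]
      rw [hfm, hany]
      simp only [Option.none_or, if_neg (by simp : ¬ (false = true))]
      exact ih (m + 1)

lemma pvMog_ge {gs : List (List String)} {m k : Int} {up : String}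
    (h : pvMog gs m up = some k) : m ≤ k := by
  induction gs generalizing m with
  | nil => simp [pvMog] at h
  | cons g gs ih =>
    unfold pvMog at h
    split at h
    · exact le_of_eq (Option.some.inj h)
    · have := ih h; omega

lemma pvMonth_eq_mog (c : String) :
    pvMonth c = pvMog pvMonthTokens 1 (PySem.Str.upper (PySem.Str.strip c)) := by
  unfold pvMonth
  rw [pvItems_eq, find_g2i]

lemma hasTok_append (a b : List String) (up : String) :
    pvHasTok (a ++ b) up = (pvHasTok a up || pvHasTok b up) := by
  unfold pvHasTok; rw [List.any_append]

lemma mog_eq_iff (gs : List (List String)) (m : Int) (i : Nat) (up : String)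
    (hi : i < gs.length) :
    (pvMog gs m up == some (m + i))
      = (pvHasTok (gs.getD i []) up && !pvHasTok ((gs.take i).flatten) up) := by
  induction gs generalizing m i with
  | nil => simp at hi
  | cons g gs ih =>
    cases i with
    | zero =>
      simp only [List.getD_cons_zero, List.take_zero, List.flatten_nil, Nat.cast_zero, add_zero]
      cases h : pvHasTok g up with
      | true =>
        simp only [pvMog]
        rw [h]
        simp [pvHasTok]
      | false =>
        simp only [pvMog]
        rw [h, if_neg (by simp : ¬ (false = true))]
        cases hmog : pvMog gs (m + 1) up with
        | none => simp
        | some k =>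
          have hk := pvMog_ge hmog
          simp
          omega
    | succ j =>
      have hj : j < gs.length := by simpa using hi
      simp only [List.getD_cons_succ, List.take_succ_cons, List.flatten_cons, hasTok_append]
      cases h : pvHasTok g up with
      | true =>
        simp only [pvMog]
        rw [h]
        simp
        push_cast
        omega
      | false =>
        simp only [pvMog]
        rw [h, if_neg (by simp : ¬ (false = true))]
        simp only [Bool.false_or]
        have hcast : m + ((j + 1 : Nat) : Int) = (m + 1) + (j : Int) := by push_cast; ring
        rw [hcast, ih (m + 1) j hj]

lemma pvLenTokens : pvMonthTokens.length = 12 := by decide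

-- the pointwise bridge: A's first-match month vs B's per-month predicate
lemma month_pointwise (c : String) (i : Nat) (hi : i < 12) :
    (pvMonth c == some ((i : Int) + 1))
      = (pvHasTok (pvMonthTokens.getD i []) (PySem.Str.upper (PySem.Str.strip c))
          && !pvHasTok ((pvMonthTokens.take i).flatten) (PySem.Str.upper (PySem.Str.strip c))) := by
  rw [pvMonth_eq_mog]
  have := mog_eq_iff pvMonthTokens 1 i (PySem.Str.upper (PySem.Str.strip c)) (by rw [pvLenTokens]; exact hi)
  rw [← this]
  norm_num [add_comm]

lemma flatMap_congr_mem {α β : Type} {l : List α} {f g : α → List β}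
    (h : ∀ a ∈ l, f a = g a) : l.flatMap f = l.flatMap g := by
  simp only [List.flatMap_def]
  exact congrArg List.flatten (List.map_congr_left h)

lemma mem_mpairs {df : List String} {p : Int × String} :
    p ∈ pvMPairs df ↔ p.2 ∈ df ∧ pvMonth p.2 = some p.1 := by
  unfold pvMPairs
  rw [List.mem_filterMap]
  constructor
  · rintro ⟨c, hc, heq⟩
    rw [Option.map_eq_some_iff] at heq
    obtain ⟨m, hm, rfl⟩ := heq
    exact ⟨hc, hm⟩
  · rintro ⟨hmem, hm⟩
    exact ⟨p.2, hmem, by rw [hm]; rfl⟩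

lemma pvMonth_range {c : String} {m : Int} (h : pvMonth c = some m) : 1 ≤ m ∧ m < 13 := by
  rw [pvMonth_eq_mog] at h
  have h1 := pvMog_ge h
  have h2 : ∀ gs (m' : Int) up k, pvMog gs m' up = some k → k < m' + gs.length := by
    intro gs
    induction gs with
    | nil => intro m' up k h; simp [pvMog] at h
    | cons g gs ih =>
      intro m' up k h
      unfold pvMog at h
      split at h
      · obtain rfl := Option.some.inj h
        simp only [List.length_cons]
        push_cast; omega
      · have := ih _ _ _ h
        simp only [List.length_cons]
        push_cast at this ⊢; omega
  have := h2 _ _ _ _ h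
  rw [pvLenTokens] at this
  omega

lemma foldlA_eq (df : List String) (acc : List (String × Int)) :
    df.foldl (fun acc c =>
      match pvMonth c with
      | some m => acc ++ [(c, m)]
      | none => acc) acc
      = acc ++ (pvMPairs df).map (fun p => (p.2, p.1)) := by
  induction df generalizing acc with
  | nil => simp [pvMPairs]
  | cons c df ih =>
    cases h : pvMonth c <;>
      simp [pvMPairs, List.filterMap_cons, h, ih]

lemma filter_mpairs_eq (df : List String) (m : Int) :
    (pvMPairs df).filter (fun p => p.1 == m)
      = (df.filter (fun c => pvMonth c == some m)).map (fun c => (m, c)) := by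
  induction df with
  | nil => rfl
  | cons c df ih =>
    unfold pvMPairs at *
    cases h : pvMonth c with
    | none => simp [List.filterMap_cons, List.filter_cons, h, ih]
    | some m' =>
      by_cases hm : m' = m <;>
        simp [List.filterMap_cons, List.filter_cons, h, hm, ih]

lemma A_char (df : List String) :
    detect_month_cols df
      = (PySem.List.sorted ((pvMPairs df).map (fun p => (p.2, p.1))) (pvKey df)).map (fun x => x.1) := by
  unfold detect_month_cols
  rw [foldlA_eq df []]
  rw [List.nil_append]
  congr 1
  unfold PySem.List.sorted2 PySem.List.sorted pvKey
  have hb : (fun a b : String × Int =>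
        decide (a.2 < b.2) || (!decide (b.2 < a.2) &&
          decide ((((PySem.List.index? df a.1).getD 0 : Nat) : Int) < (((PySem.List.index? df b.1).getD 0 : Nat) : Int))))
      = (fun a b : String × Int =>
        decide ((toLex (a.2, (((PySem.List.index? df a.1).getD 0 : Nat) : Int)) : Lex (Int × Int))
          < toLex (b.2, (((PySem.List.index? df b.1).getD 0 : Nat) : Int)))) := by
    funext a b
    by_cases h1 : a.2 < b.2 <;> by_cases h2 : b.2 < a.2 <;>
      by_cases h3 : (((PySem.List.index? df a.1).getD 0 : Nat) : Int) < (((PySem.List.index? df b.1).getD 0 : Nat) : Int) <;>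
      simp [Prod.Lex.toLex_lt_toLex, h1, h2, h3] <;> omega
  simp only [if_neg (by simp : ¬ (false = true))]
  rw [hb]

lemma flatMap_filter_eq_of_not_mem {β : Type} (ms : List Int) (p : Int × β) (l : List (Int × β))
    (hp : p.1 ∉ ms) :
    ms.flatMap (fun m => (p :: l).filter (fun q => q.1 == m))
      = ms.flatMap (fun m => l.filter (fun q => q.1 == m)) := by
  induction ms with
  | nil => rfl
  | cons m ms ih =>
    have h1 : p.1 ≠ m := fun h => hp (by simp [h])
    have h2 : p.1 ∉ ms := fun h => hp (by simp [h])
    have hfe : (p :: l).filter (fun q => q.1 == m) = l.filter (fun q => q.1 == m) := by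
      simp [List.filter_cons, h1]
    simp only [List.flatMap_cons, hfe, ih h2]

lemma flatMap_filter_cons_perm {β : Type} (ms : List Int) (hnd : ms.Nodup) (p : Int × β)
    (l : List (Int × β)) (hp : p.1 ∈ ms) :
    (ms.flatMap (fun m => (p :: l).filter (fun q => q.1 == m))).Perm
      (p :: ms.flatMap (fun m => l.filter (fun q => q.1 == m))) := by
  induction ms with
  | nil => cases hp
  | cons m ms ih =>
    simp only [List.flatMap_cons]
    by_cases hm : p.1 = m
    · have hnotin : p.1 ∉ ms := by
        rw [hm]; exact (List.nodup_cons.mp hnd).1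
      rw [flatMap_filter_eq_of_not_mem ms p l hnotin]
      simp [List.filter_cons, hm]
    · have hp' : p.1 ∈ ms := by
        rcases List.mem_cons.mp hp with h | h
        · exact absurd h hm
        · exact h
      have hfe : (p :: l).filter (fun q => q.1 == m) = l.filter (fun q => q.1 == m) := by
        simp [List.filter_cons, hm]
      rw [hfe]
      exact (List.Perm.append_left _ (ih (List.nodup_cons.mp hnd).2 hp')).trans List.perm_middle

lemma flatMap_filter_perm {β : Type} (ms : List Int) (hnd : ms.Nodup) (l : List (Int × β))
    (h : ∀ p ∈ l, p.1 ∈ ms) :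
    (ms.flatMap (fun m => l.filter (fun q => q.1 == m))).Perm l := by
  induction l with
  | nil => simp
  | cons p l ih =>
    exact (flatMap_filter_cons_perm ms hnd p l (h p (by simp))).trans
      (List.Perm.cons p (ih (fun q hq => h q (by simp [hq]))))

lemma pairwise_chunks {α : Type} (le : α → α → Prop) (keym : α → Int) (ms : List Int)
    (f : Int → List α)
    (hms : ms.Pairwise (· < ·))
    (hkey : ∀ m ∈ ms, ∀ x ∈ f m, keym x = m)
    (hchunk : ∀ m ∈ ms, (f m).Pairwise le)
    (hcross : ∀ x y, keym x < keym y → le x y) :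
    (ms.flatMap f).Pairwise le := by
  induction ms with
  | nil => simp
  | cons m ms ih =>
    rw [List.flatMap_cons, List.pairwise_append]
    obtain ⟨hlt, hpw⟩ := List.pairwise_cons.mp hms
    refine ⟨hchunk m (by simp), ih hpw (fun m' hm' => hkey m' (by simp [hm'])) (fun m' hm' => hchunk m' (by simp [hm'])), ?_⟩
    intro x hx y hy
    obtain ⟨m', hm', hy'⟩ := List.mem_flatMap.mp hy
    apply hcross
    rw [hkey m (by simp) x hx, hkey m' (by simp [hm']) y hy']
    exact hlt m' hm'

lemma sorted_eq_T (df : List String) (hpre : Pre_detect_month_cols df) :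
    PySem.List.sorted ((pvMPairs df).map (fun p => (p.2, p.1))) (pvKey df)
      = (PySem.List.pyRange 1 13 1).flatMap
          (fun m => ((pvMPairs df).filter (fun p => p.1 == m)).map (fun p => (p.2, p.1))) := by
  have hmonths : ∀ p ∈ pvMPairs df, p.1 ∈ PySem.List.pyRange 1 13 1 := by
    intro p hp
    obtain ⟨_, hm⟩ := mem_mpairs.mp hp
    have := pvMonth_range hm
    rw [PySem.List.mem_pyRange_one]
    omega
  have hTperm : ((PySem.List.pyRange 1 13 1).flatMap
      (fun m => ((pvMPairs df).filter (fun p => p.1 == m)).map (fun p => (p.2, p.1)))).Perm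
      ((pvMPairs df).map (fun p => (p.2, p.1))) := by
    rw [← List.map_flatMap]
    exact List.Perm.map _ (flatMap_filter_perm _ (PySem.List.nodup_pyRange_one 1 13) _ hmonths)
  have hmemA : ∀ x : String × Int, x ∈ (pvMPairs df).map (fun p => (p.2, p.1)) →
      x.1 ∈ df ∧ pvMonth x.1 = some x.2 := by
    intro x hx
    obtain ⟨p, hp, rfl⟩ := List.mem_map.mp hx
    exact (mem_mpairs.mp hp)
  apply List.Perm.eq_of_pairwise (le := fun a b => pvKey df a ≤ pvKey df b)
  · intro a b ha hb hab hba
    have ha' := hmemA a ((PySem.List.mem_sorted _ _ _ _).mp ha)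
    have hb' := hmemA b (hTperm.mem_iff.mp hb)
    have hk : pvKey df a = pvKey df b := le_antisymm hab hba
    unfold pvKey at hk
    obtain ⟨ka, hka⟩ := Option.isSome_iff_exists.mp ((PySem.List.index?_isSome_iff _ _).mpr ha'.1)
    obtain ⟨kb, hkb⟩ := Option.isSome_iff_exists.mp ((PySem.List.index?_isSome_iff _ _).mpr hb'.1)
    rw [hka, hkb] at hk
    have hk' : a.2 = b.2 ∧ (ka : Int) = (kb : Int) := by
      simpa [Prod.ext_iff] using hk
    have hm2 : a.2 = b.2 := hk'.1
    have hkk : ka = kb := by exact_mod_cast hk'.2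
    subst hkk
    obtain ⟨hlt1, hget1, -⟩ := PySem.List.getElem_of_index?_eq_some hka
    obtain ⟨hlt2, hget2, -⟩ := PySem.List.getElem_of_index?_eq_some hkb
    have hm1 : a.1 = b.1 := hget1.symm.trans hget2
    exact Prod.ext hm1 hm2
  · exact PySem.List.sorted_pairwise _ _
  · apply pairwise_chunks (keym := fun x => x.2)
    · exact PySem.List.pairwise_lt_pyRange_one 1 13
    · intro m _ x hx
      obtain ⟨p, hp, rfl⟩ := List.mem_map.mp hx
      have := (List.mem_filter.mp hp).2
      simpa using this
    · intro m hm
      rw [filter_mpairs_eq, List.map_map, List.pairwise_map]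
      refine (hpre m hm).imp ?_
      intro a b hle
      unfold pvKey
      simp only [Function.comp_apply]
      rw [Prod.Lex.toLex_le_toLex]
      exact Or.inr ⟨rfl, by simpa using hle⟩
    · intro x y hxy
      unfold pvKey
      rw [Prod.Lex.toLex_le_toLex]
      left
      exact hxy
  · exact (PySem.List.sorted_perm _ _ _).trans hTperm.symm

-- A as a month-major flatMap
lemma A_final (df : List String) (hpre : Pre_detect_month_cols df) :
    detect_month_cols df
      = (PySem.List.pyRange 1 13 1).flatMap
          (fun m => df.filter (fun c => pvMonth c == some m)) := by
  rw [A_char df, sorted_eq_T df hpre, List.map_flatMap]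
  apply flatMap_congr_mem
  intro m _
  rw [filter_mpairs_eq, List.map_map, List.map_map]
  simp [Function.comp_def]

-- B as a month-major flatMap
lemma B_char (df : List String) :
    detect_month_cols_alt df
      = (PySem.List.pyRange 0 12 1).flatMap
          (fun m => df.filter (fun c => pvMonth c == some (m + 1))) := by
  unfold detect_month_cols_alt
  rw [PySem.List.foldl_append_eq_flatMap, List.nil_append]
  apply flatMap_congr_mem
  intro m hm
  rw [PySem.List.mem_pyRange_one] at hm
  obtain ⟨i, rfl⟩ : ∃ i : Nat, m = (i : Int) := ⟨m.toNat, (Int.toNat_of_nonneg hm.1).symm⟩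
  have hi : i < 12 := by exact_mod_cast hm.2
  rw [PySem.List.pyGetD_natCast, PySem.List.slice_to_natCast]
  rw [List.filter_map, List.map_map]
  have : (fun cu : String × String => cu.1) ∘ (fun c => (c, PySem.Str.upper (PySem.Str.strip c))) = id := rfl
  rw [this, List.map_id]
  apply List.filter_congr
  intro c _
  simp only [Function.comp_def]
  exact (month_pointwise c i hi).symm

-- ===== VERDICT (by name: the statement is the Claim_ definition above) =====
theorem detect_month_cols_spec : Claim_equal_detect_month_cols := by
  intro df _ hpre
  unfold Spec_detect_month_cols
  rw [A_final df hpre, B_char]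
  have hr : PySem.List.pyRange 1 13 1 = (PySem.List.pyRange 0 12 1).map (fun m => m + 1) := by decide
  rw [hr, List.flatMap_map]
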